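-- pv_equiv track=rewrite | github.com/banana-galaxy/challenges | challenge13(array)/solutions/KailiKameoka.py | solution
-- ===== SOURCE A (Python) =====
-- def solution (list):
--     moves = 0
--     last = list[0]
--     for i in range(1, len(list)):
--         while (last >= list[i]):
--             list[i] = list[i] + 1
--             moves = moves + 1
--         last = list[i]
--     return moves
-- ===== SOURCE B (Python) =====
-- def solution(list):
--     # One pass, direct arithmetic: each element is raised to max(x, last+1);
--     # the number of unit increments is the difference. (Does not mutate list;
--     # A mutates its argument in place.)
--     moves = 0
--     last = list[0]
--     for x in list[1:]:
--         nxt = last + 1 if last >= x else x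
--         moves += nxt - x
--         last = nxt
--     return moves
-- ===== Notes on version B (the rewrite author's own statement) =====
-- stated objective: faster
-- what changed: Replaced the unit-increment while loop (one iteration per move) by a single arithmetic update per element (nxt = max(x, last+1), moves += nxt - x), making the cost independent of the number of moves.
-- outside the precondition, e.g. on solution([]): A raises IndexError, B raises IndexError
import Mathlib
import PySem

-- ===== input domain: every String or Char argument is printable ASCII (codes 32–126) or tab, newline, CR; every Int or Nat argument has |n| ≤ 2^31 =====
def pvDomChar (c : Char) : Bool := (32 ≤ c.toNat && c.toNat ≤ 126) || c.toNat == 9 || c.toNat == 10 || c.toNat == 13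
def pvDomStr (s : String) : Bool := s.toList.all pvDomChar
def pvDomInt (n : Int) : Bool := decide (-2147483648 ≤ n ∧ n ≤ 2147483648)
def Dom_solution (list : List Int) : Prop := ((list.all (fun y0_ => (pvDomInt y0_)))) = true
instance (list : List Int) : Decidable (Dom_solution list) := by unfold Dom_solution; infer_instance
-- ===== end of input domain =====

-- B replaces A's unit-increment while loop by one arithmetic update per element (faster; asymptotic).
-- A mutates its list argument in place; the equivalence proved here is about the return value only.


-- ===== PORT A =====
-- the inner `while last >= list[i]: list[i] += 1; moves += 1`; returns (new list[i], new moves)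
def solWhile (last cur moves : Int) : Int × Int :=
  if last ≥ cur then solWhile last (cur + 1) (moves + 1) else (cur, moves)
termination_by (last + 1 - cur).toNat
decreasing_by omega

def solution (list : List Int) : Int :=
  match list with
  | [] => 0   -- unreachable under Pre_solution: Python A raises IndexError on []
  | h :: t =>
    (t.foldl (fun (s : Int × Int) x =>
        let r := solWhile s.2 x s.1   -- s = (moves, last)
        (r.2, r.1)) (0, h)).1

-- ===== PORT B =====
def solution_alt (list : List Int) : Int :=
  match list with
  | [] => 0   -- unreachable under Pre_solution: B also indexes list[0]
  | h :: t =>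
    (t.foldl (fun (s : Int × Int) x =>
        let nxt := if s.2 ≥ x then s.2 + 1 else x
        (s.1 + (nxt - x), nxt)) (0, h)).1

-- ===== PRECONDITION & SPEC =====
-- Pre_ excludes the empty list, on which both A and B raise IndexError (list[0]).
def Pre_solution (list : List Int) : Prop := list ≠ []
instance (list : List Int) : Decidable (Pre_solution list) := by unfold Pre_solution; infer_instance
def pvWitness_solution : List Int := [1, 1, 3]

def Spec_solution (list : List Int) (out : Int) : Prop := out = solution_alt list
instance (list : List Int) (out : Int) : Decidable (Spec_solution list out) := by unfold Spec_solution; infer_instance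

-- ===== CLAIM (what is proved, stated in full; the proofs are below) =====
def Claim_equal_solution : Prop := ∀ (list : List Int), Dom_solution list → Pre_solution list → Spec_solution list (solution list)

-- ===== LEMMAS AND PROOFS =====
theorem solWhile_eq (last cur moves : Int) :
    solWhile last cur moves = ((if last ≥ cur then last + 1 else cur),
                               moves + ((if last ≥ cur then last + 1 else cur) - cur)) := by
  fun_induction solWhile last cur moves with
  | case1 cur moves h ih =>
    rw [ih]
    simp only [Prod.mk.injEq]
    refine ⟨?_, ?_⟩ <;> split_ifs <;> omega
  | case2 cur moves h =>
    simp only [Prod.mk.injEq]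
    refine ⟨?_, ?_⟩ <;> split_ifs <;> omega

theorem solution_spec : Claim_equal_solution := by
  intro list _ hpre
  unfold Spec_solution solution solution_alt
  cases list with
  | nil => exact absurd rfl hpre
  | cons h t =>
    simp only
    congr 1
    have hfg : (fun (s : Int × Int) x =>
        let r := solWhile s.2 x s.1
        ((r.2 : Int), r.1)) = (fun (s : Int × Int) x =>
        let nxt := if s.2 ≥ x then s.2 + 1 else x
        (s.1 + (nxt - x), nxt)) := by
      funext s x
      simp [solWhile_eq]
    rw [hfg]
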